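-- pv_equiv track=rewrite | github.com/Sogayar/BuscadorPessoas | src/utils/pickers.py | pick_news_items
-- ===== SOURCE A (Python) =====
-- from typing import Any, Dict, List
--
-- def pick_news_items(payload: Dict[str, Any], limit: int = 10) -> List[Dict[str, str]]:
--     out: List[Dict[str, str]] = []
--     for key in ("news", "news_results", "top_stories"):
--         for it in payload.get(key, []) or []:
--             url = it.get("link") or it.get("url") or ""
--             if not url:
--                 continue
--             out.append({
--                 "title": it.get("title") or "",
--                 "snippet": it.get("snippet") or it.get("description") or "",
--                 "url": url,
--                 "source": it.get("source") or "",
--             })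
--     return _dedup(out)[:limit]
--
-- def _dedup(items: List[Dict[str, str]]) -> List[Dict[str, str]]:
--     seen = set()
--     out = []
--     for item in items:
--         url = item.get("url", "")
--         if not url or url in seen:
--             continue
--         seen.add(url)
--         out.append(item)
--     return out
-- ===== SOURCE B (Python) =====
-- from typing import Any, Dict, List
--
--
-- def pick_news_items(payload: Dict[str, Any], limit: int = 10) -> List[Dict[str, str]]:
--     # Single fused pass: an insertion-ordered dict keyed by url replaces the
--     # build-list + separate _dedup traversal (first occurrence wins).
--     by_url: Dict[str, Dict[str, str]] = {}
--     for key in ("news", "news_results", "top_stories"):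
--         for it in payload.get(key) or []:
--             url = it.get("link") or it.get("url") or ""
--             if url and url not in by_url:
--                 by_url[url] = {
--                     "title": it.get("title") or "",
--                     "snippet": it.get("snippet") or it.get("description") or "",
--                     "url": url,
--                     "source": it.get("source") or "",
--                 }
--     return list(by_url.values())[:limit]
-- ===== Notes on version B (the rewrite author's own statement) =====
-- stated objective: simpler
-- what changed: Replaces the build-everything-then-_dedup two-pass pipeline with one fused pass over the three key lists that dedups on the fly via an insertion-ordered dict keyed by url (first occurrence wins), then slices to the limit; no intermediate duplicate-carrying list and no helper function.
import Mathlib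
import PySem

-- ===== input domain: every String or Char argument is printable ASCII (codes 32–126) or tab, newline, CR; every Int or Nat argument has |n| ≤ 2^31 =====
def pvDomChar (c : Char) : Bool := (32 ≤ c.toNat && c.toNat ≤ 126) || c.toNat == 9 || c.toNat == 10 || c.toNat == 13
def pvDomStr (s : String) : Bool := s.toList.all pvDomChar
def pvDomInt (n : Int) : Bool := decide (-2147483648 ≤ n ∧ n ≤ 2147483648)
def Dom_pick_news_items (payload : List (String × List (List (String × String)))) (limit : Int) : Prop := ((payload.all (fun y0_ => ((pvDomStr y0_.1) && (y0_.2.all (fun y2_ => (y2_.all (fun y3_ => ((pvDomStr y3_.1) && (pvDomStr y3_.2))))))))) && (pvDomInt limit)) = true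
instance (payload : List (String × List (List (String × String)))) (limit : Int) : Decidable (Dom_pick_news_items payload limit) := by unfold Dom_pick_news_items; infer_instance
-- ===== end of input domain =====

-- B fuses A's build-then-_dedup two-pass pipeline into one pass over the three key
-- lists, deduping on the fly with an insertion-ordered dict keyed by url (simpler).

-- shared helpers: Python's `x or y` on Optional[str] values, dict lookups, the item dict literal
def pvOr (o : Option String) (d : String) : String :=
  match o with
  | some s => if s = "" then d else s
  | none => d

def pvGet (it : List (String × String)) (k : String) : Option String :=
  PySem.Dict.get? (PySem.Dict.mk it) k

-- url = it.get("link") or it.get("url") or ""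
def pvUrl (it : List (String × String)) : String :=
  pvOr (pvGet it "link") (pvOr (pvGet it "url") "")

-- the four-field dict literal appended/stored by both Pythons
def pvMkItem (it : List (String × String)) (url : String) : List (String × String) :=
  [("title", pvOr (pvGet it "title") ""),
   ("snippet", pvOr (pvGet it "snippet") (pvOr (pvGet it "description") "")),
   ("url", url),
   ("source", pvOr (pvGet it "source") "")]

-- ===== PORT A =====
-- loop body of _dedup
def pvDedupStep (st : PySem.Set String × List (List (String × String)))
    (item : List (String × String)) : PySem.Set String × List (List (String × String)) :=
  let url := PySem.Dict.getD (PySem.Dict.mk item) "url" ""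
  if url = "" ∨ PySem.Set.contains st.1 url = true then st
  else (PySem.Set.add st.1 url, st.2 ++ [item])

def pvDedup (items : List (List (String × String))) : List (List (String × String)) :=
  (items.foldl pvDedupStep ((PySem.Set.empty : PySem.Set String), [])).2

-- inner loop body of pick_news_items (A): append the built dict unless url is falsy
def pvBuildStep (out : List (List (String × String))) (it : List (String × String)) :
    List (List (String × String)) :=
  let url := pvUrl it
  if url = "" then out else out ++ [pvMkItem it url]

-- `payload.get(key, []) or []`: getD; `or []` is the identity here (an empty list is already [])
def pick_news_items (payload : List (String × List (List (String × String)))) (limit : Int) : List (List (String × String)) :=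
  let out := ["news", "news_results", "top_stories"].foldl
    (fun out key => (PySem.Dict.getD (PySem.Dict.mk payload) key []).foldl pvBuildStep out) []
  PySem.List.slice (pvDedup out) none (some limit)

-- ===== PORT B =====
-- inner loop body of B: insert into the url-keyed dict when url is truthy and unseen
def pvAltStep (d : PySem.Dict String (List (String × String))) (it : List (String × String)) :
    PySem.Dict String (List (String × String)) :=
  let url := pvUrl it
  if url ≠ "" ∧ PySem.Dict.contains d url = false then
    PySem.Dict.insert d url (pvMkItem it url)
  else d

def pick_news_items_alt (payload : List (String × List (List (String × String)))) (limit : Int) : List (List (String × String)) :=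
  let by_url := ["news", "news_results", "top_stories"].foldl
    (fun d key => (PySem.Dict.getD (PySem.Dict.mk payload) key []).foldl pvAltStep d)
    (PySem.Dict.empty : PySem.Dict String (List (String × String)))
  PySem.List.slice (PySem.Dict.values by_url) none (some limit)

-- ===== PRECONDITION & SPEC =====
def Spec_pick_news_items (payload : List (String × List (List (String × String)))) (limit : Int) (out : List (List (String × String))) : Prop := out = pick_news_items_alt payload limit
instance (payload : List (String × List (List (String × String)))) (limit : Int) (out : List (List (String × String))) : Decidable (Spec_pick_news_items payload limit out) := by unfold Spec_pick_news_items; infer_instance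

-- ===== CLAIM (what is proved, stated in full; the proofs are below) =====
def Claim_equal_pick_news_items : Prop := ∀ (payload : List (String × List (List (String × String)))) (limit : Int), Dom_pick_news_items payload limit → Spec_pick_news_items payload limit (pick_news_items payload limit)

-- ===== LEMMAS AND PROOFS =====

-- the items A's build loop appends for a raw list l
def pvF (l : List (List (String × String))) : List (List (String × String)) :=
  (l.filter (fun it => !decide (pvUrl it = ""))).map (fun it => pvMkItem it (pvUrl it))

theorem pvBuild_shape (l : List (List (String × String)))
    (acc : List (List (String × String))) :
    l.foldl pvBuildStep acc = acc ++ pvF l := by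
  induction l generalizing acc with
  | nil => simp [pvF]
  | cons it l ih =>
    by_cases h : pvUrl it = "" <;>
      simp [pvF, pvBuildStep, h, ih]

theorem pvMkItem_url (it : List (String × String)) (url : String) :
    PySem.Dict.getD (PySem.Dict.mk (pvMkItem it url)) "url" "" = url := by
  rfl

theorem pvKey (l : List (List (String × String))) (seen : PySem.Set String)
    (d : PySem.Dict String (List (String × String)))
    (hinv : ∀ u, PySem.Set.contains seen u = PySem.Dict.contains d u) :
    ((pvF l).foldl pvDedupStep (seen, PySem.Dict.values d)).2
      = PySem.Dict.values (l.foldl pvAltStep d) := by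
  induction l generalizing seen d with
  | nil => simp [pvF]
  | cons it l ih =>
    by_cases hu : pvUrl it = ""
    · have h1 : pvF (it :: l) = pvF l := by simp [pvF, hu]
      have h2 : pvAltStep d it = d := by simp [pvAltStep, hu]
      rw [h1, List.foldl_cons, h2, ih seen d hinv]
    · have h1 : pvF (it :: l) = pvMkItem it (pvUrl it) :: pvF l := by
        simp [pvF, hu]
      rw [h1, List.foldl_cons]
      by_cases hc : PySem.Dict.contains d (pvUrl it) = true
      · have hs : PySem.Set.contains seen (pvUrl it) = true := by rw [hinv]; exact hc
        have hmem : pvUrl it ∈ seen := (PySem.Set.contains_iff seen (pvUrl it)).1 hs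
        have hg : pvDedupStep (seen, PySem.Dict.values d) (pvMkItem it (pvUrl it))
            = (seen, PySem.Dict.values d) := by
          simp [pvDedupStep, pvMkItem_url, hmem]
        have hb : pvAltStep d it = d := by simp [pvAltStep, hc]
        rw [hg, ih seen d hinv, List.foldl_cons, hb]
      · have hc' : PySem.Dict.contains d (pvUrl it) = false := by
          simpa using hc
        have hs : PySem.Set.contains seen (pvUrl it) = false := by rw [hinv]; exact hc'
        have hmem : pvUrl it ∉ seen := by
          intro hm
          have := (PySem.Set.contains_iff (s := seen) (x := pvUrl it)).2 hm
          rw [hs] at this; exact Bool.false_ne_true this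
        have hg : pvDedupStep (seen, PySem.Dict.values d) (pvMkItem it (pvUrl it))
            = (PySem.Set.add seen (pvUrl it),
               PySem.Dict.values d ++ [pvMkItem it (pvUrl it)]) := by
          simp [pvDedupStep, pvMkItem_url, hu, hmem]
        have hb : pvAltStep d it
            = PySem.Dict.insert d (pvUrl it) (pvMkItem it (pvUrl it)) := by
          simp [pvAltStep, hu, hc']
        have hv : PySem.Dict.values (PySem.Dict.insert d (pvUrl it) (pvMkItem it (pvUrl it)))
            = PySem.Dict.values d ++ [pvMkItem it (pvUrl it)] := by
          simp [PySem.Dict.values, PySem.Dict.items_insert, hc']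
        have hinv' : ∀ u, PySem.Set.contains (PySem.Set.add seen (pvUrl it)) u
          = PySem.Dict.contains (PySem.Dict.insert d (pvUrl it) (pvMkItem it (pvUrl it))) u := by
          intro u
          rw [PySem.Set.add_of_not_mem hmem, PySem.Dict.contains_insert, ← hinv u]
          by_cases h : u = pvUrl it <;> simp [h, PySem.Set.contains_eq_listContains]
        rw [hg, List.foldl_cons, hb, ← hv, ih _ _ hinv']

theorem pvMain (payload : List (String × List (List (String × String)))) (limit : Int) :
    pick_news_items payload limit = pick_news_items_alt payload limit := by
  unfold pick_news_items pick_news_items_alt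
  simp only [List.foldl_cons, List.foldl_nil]
  rw [pvBuild_shape, pvBuild_shape, pvBuild_shape, ← List.foldl_append, ← List.foldl_append]
  have hF : pvF ((PySem.Dict.getD (PySem.Dict.mk payload) "news" []
        ++ PySem.Dict.getD (PySem.Dict.mk payload) "news_results" [])
        ++ PySem.Dict.getD (PySem.Dict.mk payload) "top_stories" [])
      = (([] ++ pvF (PySem.Dict.getD (PySem.Dict.mk payload) "news" []))
        ++ pvF (PySem.Dict.getD (PySem.Dict.mk payload) "news_results" []))
        ++ pvF (PySem.Dict.getD (PySem.Dict.mk payload) "top_stories" []) := by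
    simp [pvF, List.filter_append]
  rw [← hF]
  have hkey := pvKey ((PySem.Dict.getD (PySem.Dict.mk payload) "news" []
        ++ PySem.Dict.getD (PySem.Dict.mk payload) "news_results" [])
        ++ PySem.Dict.getD (PySem.Dict.mk payload) "top_stories" [])
      (PySem.Set.empty : PySem.Set String)
      (PySem.Dict.empty : PySem.Dict String (List (String × String)))
      (by intro u; rfl)
  unfold pvDedup
  have hemp : PySem.Dict.values (PySem.Dict.empty : PySem.Dict String (List (String × String))) = [] := rfl
  rw [hemp] at hkey
  rw [hkey, List.append_assoc]

-- ===== VERDICT (by name: the statement is the Claim_ definition above) =====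
theorem pick_news_items_spec : Claim_equal_pick_news_items := by
  intro payload limit _
  unfold Spec_pick_news_items
  exact pvMain payload limit
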